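-- pv_equiv track=rewrite | github.com/KareemOsamaSobeih/OS-Scheduler | schedular.py | SRTN
-- ===== SOURCE A (Python) =====
-- from heapq import heappush, heappop
--
-- def SRTN(procs, contx):
-- 	cnt = 0
-- 	n = len(procs)
-- 	time = 0
-- 	hp = []
-- 	finish = 0
-- 	last = -1
-- 	y = [0]
-- 	while finish < n:
-- 		while cnt < n and procs[cnt]['arrival'] <= time :
-- 			heappush(hp, [procs[cnt]['burst'], procs[cnt]['num'], cnt])
-- 			cnt += 1
-- 		time += 1
-- 		y.append(0)
-- 		if (len(hp) > 0):
-- 			if (last != -1 and hp[0][2] != last):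
-- 				y.extend((contx)*[0])
-- 				time += contx
-- 			y[time] = procs[hp[0][2]]['num']
-- 			last = hp[0][2]
-- 			hp[0][0] -= 1
-- 			if(hp[0][0] == 0):
-- 				p = heappop(hp)[2]
-- 				procs[p]['end'] = time
-- 				finish += 1
-- 	return procs, y
-- ===== SOURCE B (Python) =====
-- def SRTN(procs, contx):
--     n = len(procs)
--     remaining = [None] * n
--     cnt = 0
--     finish = 0
--     last = -1
--     y = [0]
--     while finish < n:
--         t = len(y) - 1
--         while cnt < n and procs[cnt]['arrival'] <= t:
--             remaining[cnt] = procs[cnt]['burst']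
--             cnt += 1
--         sel = -1
--         for i in range(cnt):
--             if remaining[i] is not None and (sel == -1 or (remaining[i], procs[i]['num'], i) < (remaining[sel], procs[sel]['num'], sel)):
--                 sel = i
--         if sel == -1:
--             y.append(0)
--         else:
--             if last != -1 and sel != last:
--                 y.extend([0] * contx)
--             y.append(procs[sel]['num'])
--             last = sel
--             remaining[sel] -= 1
--             if remaining[sel] == 0:
--                 remaining[sel] = None
--                 procs[sel]['end'] = len(y) - 1
--                 finish += 1
--     return procs, y
-- ===== Notes on version B (the rewrite author's own statement) =====
-- stated objective: simpler
-- what changed: Replaces the binary heap (heappush/heappop with in-place root mutation) by a per-process remaining-time array with a linear argmin scan per tick ordered by (remaining, num, index), and drops the separate time counter by deriving the clock from len(y)-1, appending the running process's slot instead of overwriting y[time].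
import Mathlib
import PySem

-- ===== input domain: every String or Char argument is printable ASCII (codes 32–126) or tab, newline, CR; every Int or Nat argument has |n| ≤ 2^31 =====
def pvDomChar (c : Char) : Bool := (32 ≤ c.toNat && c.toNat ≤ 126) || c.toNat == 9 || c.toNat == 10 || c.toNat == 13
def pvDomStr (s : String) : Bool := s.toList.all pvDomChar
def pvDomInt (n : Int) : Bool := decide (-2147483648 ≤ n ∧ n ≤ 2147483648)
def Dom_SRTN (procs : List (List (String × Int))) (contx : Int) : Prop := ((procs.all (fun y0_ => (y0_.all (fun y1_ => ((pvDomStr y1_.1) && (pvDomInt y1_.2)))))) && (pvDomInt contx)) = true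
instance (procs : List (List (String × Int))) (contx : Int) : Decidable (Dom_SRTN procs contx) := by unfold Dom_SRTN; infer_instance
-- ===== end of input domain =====

-- B replaces A's heap by a per-process remaining array with a linear argmin scan and derives
-- the clock from len(y)-1 (objective: simpler).  Both A and B mutate procs in place in Python
-- (setting procs[i]['end']); the ports return the updated procs, so the claim covers that too.

-- shared tiny helpers (the same dict-read / dict-write / list-index expressions occur verbatim in both Pythons)
def dGet (p : List (String × Int)) (k : String) : Int := (PySem.Dict.mk p).getD k 0
def procAt (procs : List (List (String × Int))) (i : Int) : List (String × Int) :=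
  PySem.List.pyGetD procs i []
def setEnd (procs : List (List (String × Int))) (i : Int) (v : Int) : List (List (String × Int)) :=
  PySem.List.pySetD procs i ((PySem.Dict.insert (PySem.Dict.mk (procAt procs i)) "end" v).items)
-- fuel guard making the unbounded Python 'while' total (never exhausted on Pre_ inputs)
def fuelFor (procs : List (List (String × Int))) : Nat :=
  procs.foldl (fun s p => s + (dGet p "arrival").natAbs + (dGet p "burst").natAbs) 0 + procs.length + 1

-- Python's lexicographic comparison of [burst, num, idx] lists / (rem, num, idx) tuples
def eLt (a b : Int × Int × Int) : Bool :=
  decide (a.1 < b.1) || (a.1 == b.1 && (decide (a.2.1 < b.2.1) || (a.2.1 == b.2.1 && decide (a.2.2 < b.2.2))))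

-- ===== PORT A =====
-- CPython heapq._siftdown (exact transliteration)
def siftdownLoop (h : List (Int × Int × Int)) (startpos pos : Nat) (newitem : Int × Int × Int) :
    List (Int × Int × Int) :=
  if hgt : startpos < pos then
    if eLt newitem (h.getD ((pos - 1) / 2) default) then
      siftdownLoop (h.set pos (h.getD ((pos - 1) / 2) default)) startpos ((pos - 1) / 2) newitem
    else h.set pos newitem
  else h.set pos newitem
termination_by pos
decreasing_by omega

def heappush (h : List (Int × Int × Int)) (item : Int × Int × Int) : List (Int × Int × Int) :=
  siftdownLoop (h ++ [item]) 0 h.length item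

-- CPython heapq._siftup's child-descent loop (exact; the trailing heap[pos]=newitem; _siftdown(...) is the
-- siftdownLoop call in heappop, which writes newitem at pos first thing it does)
def siftupLoop (h : List (Int × Int × Int)) (pos : Nat) : List (Int × Int × Int) × Nat :=
  if hc : 2 * pos + 1 < h.length then
    if 2 * pos + 2 < h.length && !(eLt (h.getD (2 * pos + 1) default) (h.getD (2 * pos + 2) default))
    then siftupLoop (h.set pos (h.getD (2 * pos + 2) default)) (2 * pos + 2)
    else siftupLoop (h.set pos (h.getD (2 * pos + 1) default)) (2 * pos + 1)
  else (h, pos)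
termination_by h.length - pos
decreasing_by all_goals simp only [List.length_set]; omega

def heappop (h : List (Int × Int × Int)) : (Int × Int × Int) × List (Int × Int × Int) :=
  let lastelt := h.getD (h.length - 1) default
  let h1 := h.dropLast
  if 0 < h1.length then
    let returnitem := h1.getD 0 default
    let h2 := h1.set 0 lastelt
    let sp := siftupLoop h2 0
    (returnitem, siftdownLoop sp.1 0 sp.2 lastelt)
  else (lastelt, h1)

-- inner admission 'while cnt < n and procs[cnt]['arrival'] <= time'
def admitA (procs : List (List (String × Int))) (n cnt : Nat) (time : Int)
    (hp : List (Int × Int × Int)) : Nat × List (Int × Int × Int) :=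
  if h : cnt < n ∧ dGet (procAt procs cnt) "arrival" ≤ time then
    admitA procs n (cnt + 1) time
      (heappush hp (dGet (procAt procs cnt) "burst", dGet (procAt procs cnt) "num", (cnt : Int)))
  else (cnt, hp)
termination_by n - cnt
decreasing_by omega

def loopA (contx : Int) (n : Nat) :
    Nat → List (List (String × Int)) → Nat → Int → List (Int × Int × Int) → Nat → Int → List Int →
    (List (List (String × Int))) × List Int
  | 0, procs, _, _, _, _, _, y => (procs, y)
  | fuel + 1, procs, cnt, time, hp, finish, last, y =>
    if finish < n then
      let ah := admitA procs n cnt time hp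
      let time2 := time + 1
      let y2 := y ++ [0]
      if 0 < ah.2.length then
        let root := ah.2.getD 0 default
        let yt :=
          if last ≠ -1 ∧ root.2.2 ≠ last then (y2 ++ List.replicate contx.toNat 0, time2 + contx)
          else (y2, time2)
        let y4 := PySem.List.pySetD yt.1 yt.2 (dGet (procAt procs root.2.2) "num")
        let hp3 := ah.2.set 0 (root.1 - 1, root.2.1, root.2.2)
        if (hp3.getD 0 default).1 == 0 then
          let pr := heappop hp3
          loopA contx n fuel (setEnd procs pr.1.2.2 yt.2) ah.1 yt.2 pr.2 (finish + 1) root.2.2 y4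
        else
          loopA contx n fuel procs ah.1 yt.2 hp3 finish root.2.2 y4
      else
        loopA contx n fuel procs ah.1 time2 ah.2 finish last y2
    else (procs, y)

def SRTN (procs : List (List (String × Int))) (contx : Int) : (List (List (String × Int))) × List Int :=
  loopA contx procs.length (fuelFor procs) procs 0 0 [] 0 (-1) [0]

-- ===== PORT B =====
def admitB (procs : List (List (String × Int))) (n cnt : Nat) (t : Int)
    (remaining : List (Option Int)) : Nat × List (Option Int) :=
  if h : cnt < n ∧ dGet (procAt procs cnt) "arrival" ≤ t then
    admitB procs n (cnt + 1) t (remaining.set cnt (some (dGet (procAt procs cnt) "burst")))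
  else (cnt, remaining)
termination_by n - cnt
decreasing_by omega

-- (remaining[sel], procs[sel]['num'], sel), read for an already-selected (hence active) sel
def keyB (procs : List (List (String × Int))) (remaining : List (Option Int)) (sel : Int) :
    Int × Int × Int :=
  ((remaining.getD sel.toNat none).getD 0, dGet (procAt procs sel) "num", sel)

-- 'for i in range(cnt): if remaining[i] is not None and (sel == -1 or key(i) < key(sel)): sel = i'
def selB (procs : List (List (String × Int))) (remaining : List (Option Int)) (cnt : Nat) : Int :=
  (List.range cnt).foldl
    (fun sel i =>
      match remaining.getD i none with
      | none => sel
      | some r =>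
        if sel == -1 || eLt (r, dGet (procAt procs (i : Int)) "num", (i : Int)) (keyB procs remaining sel)
        then (i : Int) else sel)
    (-1)

def loopB (contx : Int) (n : Nat) :
    Nat → List (List (String × Int)) → List (Option Int) → Nat → Nat → Int → List Int →
    (List (List (String × Int))) × List Int
  | 0, procs, _, _, _, _, y => (procs, y)
  | fuel + 1, procs, remaining, cnt, finish, last, y =>
    if finish < n then
      let t : Int := (y.length : Int) - 1
      let ab := admitB procs n cnt t remaining
      let sel := selB procs ab.2 ab.1
      if sel == -1 then loopB contx n fuel procs ab.2 ab.1 finish last (y ++ [0])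
      else
        let y2 := if last ≠ -1 ∧ sel ≠ last then y ++ List.replicate contx.toNat 0 else y
        let y3 := y2 ++ [dGet (procAt procs sel) "num"]
        let r := (ab.2.getD sel.toNat none).getD 0 - 1
        if r == 0 then
          loopB contx n fuel (setEnd procs sel ((y3.length : Int) - 1)) (ab.2.set sel.toNat none)
            ab.1 (finish + 1) sel y3
        else
          loopB contx n fuel procs (ab.2.set sel.toNat (some r)) ab.1 finish sel y3
    else (procs, y)

def SRTN_alt (procs : List (List (String × Int))) (contx : Int) :
    (List (List (String × Int))) × List Int :=
  loopB contx procs.length (fuelFor procs) procs (List.replicate procs.length none) 0 0 (-1) [0]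

-- ===== PRECONDITION & SPEC =====
-- Pre_ excludes: processes whose dict lacks an 'arrival'/'burst'/'num' key (A raises KeyError),
-- non-positive bursts (A's while loop never terminates), and negative contx, on which A's
-- y[time] write goes through a negative index and either raises IndexError or silently
-- overwrites an earlier Gantt slot — an accident of A's index arithmetic.
def Pre_SRTN (procs : List (List (String × Int))) (contx : Int) : Prop :=
  0 ≤ contx ∧ ∀ p ∈ procs,
    (PySem.Dict.mk p).contains "arrival" = true ∧
    (PySem.Dict.mk p).contains "burst" = true ∧
    (PySem.Dict.mk p).contains "num" = true ∧
    1 ≤ (PySem.Dict.mk p).getD "burst" 0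
instance (procs : List (List (String × Int))) (contx : Int) : Decidable (Pre_SRTN procs contx) := by
  unfold Pre_SRTN; infer_instance

def pvWitness_SRTN : (List (List (String × Int))) × Int :=
  ([[("arrival", 0), ("burst", 2), ("num", 1)], [("arrival", 1), ("burst", 1), ("num", 2)]], 1)

def Spec_SRTN (procs : List (List (String × Int))) (contx : Int)
    (out : (List (List (String × Int))) × List Int) : Prop := out = SRTN_alt procs contx
instance (procs : List (List (String × Int))) (contx : Int)
    (out : (List (List (String × Int))) × List Int) : Decidable (Spec_SRTN procs contx out) := by
  unfold Spec_SRTN; infer_instance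

-- ===== CLAIM (what is proved, stated in full; the proofs are below) =====
def Claim_equal_SRTN : Prop := ∀ (procs : List (List (String × Int))) (contx : Int),
  Dom_SRTN procs contx → Pre_SRTN procs contx → Spec_SRTN procs contx (SRTN procs contx)

-- ===== LEMMAS AND PROOFS =====

-- total-order facts about eLt
def Le (a b : Int × Int × Int) : Prop := eLt b a = false

theorem pvLeRefl (a : Int × Int × Int) : Le a a := by
  obtain ⟨a1, a2, a3⟩ := a; simp [Le, eLt]
theorem pvLeOfLt {a b : Int × Int × Int} (h : eLt a b = true) : Le a b := by
  obtain ⟨a1, a2, a3⟩ := a; obtain ⟨b1, b2, b3⟩ := b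
  simp [Le, eLt] at *; omega
theorem pvLeTrans {a b c : Int × Int × Int} (h1 : Le a b) (h2 : Le b c) : Le a c := by
  obtain ⟨a1, a2, a3⟩ := a; obtain ⟨b1, b2, b3⟩ := b; obtain ⟨c1, c2, c3⟩ := c
  simp [Le, eLt] at *; omega
theorem pvLeOfNotLt {a b : Int × Int × Int} (h : eLt a b = false) : Le b a := h

-- heap predicate: every non-root position is ≥ its parent
def IsHeap (h : List (Int × Int × Int)) : Prop :=
  ∀ j, 0 < j → j < h.length → Le (h.getD ((j - 1) / 2) default) (h.getD j default)

theorem getD_set_self {l : List (Int × Int × Int)} {i : Nat} {v : Int × Int × Int} (h : i < l.length) :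
    (l.set i v).getD i default = v := by
  simp [List.getD_eq_getElem?_getD, h]
theorem getD_set_ne {l : List (Int × Int × Int)} {i j : Nat} {v : Int × Int × Int} (h : i ≠ j) :
    (l.set i v).getD j default = l.getD j default := by
  simp [List.getD_eq_getElem?_getD, List.getElem?_set_ne h]

theorem root_min {h : List (Int × Int × Int)} (hh : IsHeap h) :
    ∀ j, j < h.length → Le (h.getD 0 default) (h.getD j default) := by
  intro j
  induction j using Nat.strong_induction_on with
  | _ j ih =>
    intro hj
    rcases Nat.eq_zero_or_pos j with rfl | hpos
    · exact pvLeRefl _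
    · exact pvLeTrans (ih ((j - 1) / 2) (by omega) (by omega)) (hh j hpos hj)

-- multiset count of a set-update
theorem count_set {l : List (Int × Int × Int)} {i : Nat} (hi : i < l.length)
    (v b : Int × Int × Int) :
    (l.set i v).count b + (if l.getD i default = b then 1 else 0) =
      l.count b + (if v = b then 1 else 0) := by
  induction l generalizing i with
  | nil => simp at hi
  | cons x xs ih =>
    cases i with
    | zero => simp [List.count_cons]; split <;> split <;> omega
    | succ k =>
      simp only [List.set_cons_succ, List.count_cons, List.getD_cons_succ]
      have := ih (i := k) (by simpa using hi)
      split <;> omega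

theorem perm_set_set {l : List (Int × Int × Int)} {i j : Nat} (hij : i ≠ j)
    (hi : i < l.length) (hj : j < l.length) (x : Int × Int × Int) :
    ((l.set i (l.getD j default)).set j x).Perm (l.set i x) := by
  rw [List.perm_iff_count]
  intro b
  have h1 := count_set (l := l.set i (l.getD j default)) (i := j) (by simpa using hj) x b
  have h2 := count_set (l := l) (i := i) hi (l.getD j default) b
  have h3 := count_set (l := l) (i := i) hi x b
  rw [getD_set_ne hij] at h1
  omega

-- siftdown establishes the heap property and permutes to a point update
theorem sd_ok (pos : Nat) : ∀ (h : List (Int × Int × Int)) (x : Int × Int × Int),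
    pos < h.length →
    (∀ j, 0 < j → j < h.length → j ≠ pos → (j - 1) / 2 ≠ pos →
      Le (h.getD ((j - 1) / 2) default) (h.getD j default)) →
    (∀ j, 0 < j → j < h.length → (j - 1) / 2 = pos → Le x (h.getD j default)) →
    (0 < pos → ∀ j, 0 < j → j < h.length → (j - 1) / 2 = pos →
      Le (h.getD ((pos - 1) / 2) default) (h.getD j default)) →
    IsHeap (siftdownLoop h 0 pos x) ∧ (siftdownLoop h 0 pos x).Perm (h.set pos x) := by
  induction pos using Nat.strong_induction_on with
  | _ pos ih =>
    intro h x hlen A1 B1 C1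
    rw [siftdownLoop]
    by_cases hgt : 0 < pos
    · rw [dif_pos hgt]
      by_cases hlt : eLt x (h.getD ((pos - 1) / 2) default) = true
      · rw [if_pos hlt]
        have hpplen : (pos - 1) / 2 < h.length := by omega
        have hmain := ih ((pos - 1) / 2) (by omega)
          (h.set pos (h.getD ((pos - 1) / 2) default)) x (by simpa using hpplen)
          ?_ ?_ ?_
        · exact ⟨hmain.1, hmain.2.trans (perm_set_set (by omega) hlen hpplen x)⟩
        · -- A1 for the shifted array
          intro j hj0 hjlen hjne hpjne
          simp only [List.length_set] at hjlen
          have hjpos : j ≠ pos := by intro hE; apply hpjne; omega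
          rw [getD_set_ne (Ne.symm hjpos)]
          by_cases hq : (j - 1) / 2 = pos
          · rw [hq, getD_set_self hlen]
            exact C1 hgt j hj0 hjlen hq
          · rw [getD_set_ne (Ne.symm hq)]
            exact A1 j hj0 hjlen hjpos hq
        · -- B1
          intro j hj0 hjlen hpj
          simp only [List.length_set] at hjlen
          by_cases hjpos : j = pos
          · subst hjpos; rw [getD_set_self hlen]
            exact pvLeOfLt hlt
          · rw [getD_set_ne (Ne.symm hjpos)]
            have hA := A1 j hj0 hjlen hjpos (by omega)
            rw [hpj] at hA
            exact pvLeTrans (pvLeOfLt hlt) hA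
        · -- C1
          intro hpp0 j hj0 hjlen hpj
          simp only [List.length_set] at hjlen
          have hppp : ((pos - 1) / 2 - 1) / 2 ≠ pos := by omega
          rw [getD_set_ne (Ne.symm hppp)]
          have hA := A1 ((pos - 1) / 2) hpp0 hpplen (by omega) (by omega)
          by_cases hjpos : j = pos
          · subst hjpos; rw [getD_set_self hlen]; exact hA
          · rw [getD_set_ne (Ne.symm hjpos)]
            have hA2 := A1 j hj0 hjlen hjpos (by omega)
            rw [hpj] at hA2
            exact pvLeTrans hA hA2
      · rw [if_neg hlt]
        refine ⟨?_, List.Perm.refl _⟩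
        intro j hj0 hjlen
        simp only [List.length_set] at hjlen
        by_cases hjpos : j = pos
        · subst hjpos
          rw [getD_set_self hlen, getD_set_ne (by omega)]
          exact pvLeOfNotLt (by simpa using hlt)
        · rw [getD_set_ne (Ne.symm hjpos)]
          by_cases hq : (j - 1) / 2 = pos
          · rw [hq, getD_set_self hlen]
            exact B1 j hj0 hjlen hq
          · rw [getD_set_ne (Ne.symm hq)]
            exact A1 j hj0 hjlen hjpos hq
    · rw [dif_neg hgt]
      have hpos0 : pos = 0 := by omega
      subst hpos0
      refine ⟨?_, List.Perm.refl _⟩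
      intro j hj0 hjlen
      simp only [List.length_set] at hjlen
      by_cases hq : (j - 1) / 2 = 0
      · rw [hq, getD_set_self hlen, getD_set_ne (by omega : (0 : Nat) ≠ j)]
        exact B1 j hj0 hjlen hq
      · rw [getD_set_ne (Ne.symm hq), getD_set_ne (by omega : (0 : Nat) ≠ j)]
        exact A1 j hj0 hjlen (by omega) hq

theorem su_sd_ok (k : Nat) : ∀ (h : List (Int × Int × Int)) (pos : Nat) (x : Int × Int × Int),
    h.length - pos ≤ k → pos < h.length →
    (∀ j, 0 < j → j < h.length → j ≠ pos → (j - 1) / 2 ≠ pos →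
      Le (h.getD ((j - 1) / 2) default) (h.getD j default)) →
    (0 < pos → ∀ j, 0 < j → j < h.length → (j - 1) / 2 = pos →
      Le (h.getD ((pos - 1) / 2) default) (h.getD j default)) →
    IsHeap (siftdownLoop (siftupLoop h pos).1 0 (siftupLoop h pos).2 x) ∧
      (siftdownLoop (siftupLoop h pos).1 0 (siftupLoop h pos).2 x).Perm (h.set pos x) := by
  induction k with
  | zero =>
    intro h pos x hk hlen K D
    omega
  | succ k ih =>
    intro h pos x hk hlen K D
    rw [siftupLoop]
    by_cases hc : 2 * pos + 1 < h.length
    · rw [dif_pos hc]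
      have step : ∀ cp : Nat, cp < h.length → 0 < cp → (cp - 1) / 2 = pos →
          (∀ j, 0 < j → j < h.length → (j - 1) / 2 = pos →
            Le (h.getD cp default) (h.getD j default)) →
          IsHeap (siftdownLoop (siftupLoop (h.set pos (h.getD cp default)) cp).1 0
              (siftupLoop (h.set pos (h.getD cp default)) cp).2 x) ∧
            (siftdownLoop (siftupLoop (h.set pos (h.getD cp default)) cp).1 0
              (siftupLoop (h.set pos (h.getD cp default)) cp).2 x).Perm (h.set pos x) := by
        intro cp hcp hcp0 hchild hmin
        have hple : pos < cp := by omega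
        have hres := ih (h.set pos (h.getD cp default)) cp x
          (by simp only [List.length_set]; omega) (by simpa using hcp) ?_ ?_
        · exact ⟨hres.1, hres.2.trans (perm_set_set (by omega) hlen hcp x)⟩
        · -- K'
          intro j hj0 hjlen hjcp hpjcp
          simp only [List.length_set] at hjlen
          by_cases hjpos : j = pos
          · subst hjpos
            rw [getD_set_self hlen, getD_set_ne (by omega : j ≠ (j - 1) / 2)]
            exact D (by omega) cp hcp0 hcp hchild
          · rw [getD_set_ne (Ne.symm hjpos)]
            by_cases hq : (j - 1) / 2 = pos
            · rw [hq, getD_set_self hlen]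
              exact hmin j hj0 hjlen hq
            · rw [getD_set_ne (Ne.symm hq)]
              exact K j hj0 hjlen hjpos hq
        · -- D'
          intro _ j hj0 hjlen hpj
          simp only [List.length_set] at hjlen
          rw [hchild, getD_set_self hlen,
            getD_set_ne (by omega : pos ≠ j)]
          have hK := K j hj0 hjlen (by omega) (by omega)
          rw [hpj] at hK
          exact hK
      by_cases hcpb : (2 * pos + 2 < h.length &&
          !(eLt (h.getD (2 * pos + 1) default) (h.getD (2 * pos + 2) default))) = true
      · rw [if_pos hcpb]
        simp only [Bool.and_eq_true, Bool.not_eq_true', decide_eq_true_eq] at hcpb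
        refine step (2 * pos + 2) hcpb.1 (by omega) (by omega) ?_
        intro j hj0 hjlen hpj
        have : j = 2 * pos + 1 ∨ j = 2 * pos + 2 := by omega
        rcases this with rfl | rfl
        · exact hcpb.2
        · exact pvLeRefl _
      · rw [if_neg hcpb]
        simp only [Bool.and_eq_true, Bool.not_eq_true', decide_eq_true_eq, not_and] at hcpb
        refine step (2 * pos + 1) hc (by omega) (by omega) ?_
        intro j hj0 hjlen hpj
        have : j = 2 * pos + 1 ∨ j = 2 * pos + 2 := by omega
        rcases this with rfl | rfl
        · exact pvLeRefl _
        · exact pvLeOfLt (by simpa using hcpb hjlen)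
    · rw [dif_neg hc]
      exact sd_ok pos h x hlen K
        (fun j hj0 hjlen hpj => absurd hjlen (by omega)) D

theorem push_ok {h : List (Int × Int × Int)} (hh : IsHeap h) (x : Int × Int × Int) :
    IsHeap (heappush h x) ∧ (heappush h x).Perm (x :: h) := by
  have hres := sd_ok h.length (h ++ [x]) x (by simp) ?_ ?_ ?_
  · refine ⟨hres.1, hres.2.trans ?_⟩
    rw [List.set_append_right _ _ (le_refl h.length)]
    simpa using List.perm_append_singleton x h
  · intro j hj0 hjlen hjne hpjne
    simp only [List.length_append, List.length_cons, List.length_nil] at hjlen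
    have hjlt : j < h.length := by omega
    have hqlt : (j - 1) / 2 < h.length := by omega
    rw [List.getD_append _ _ _ _ hqlt, List.getD_append _ _ _ _ hjlt]
    exact hh j hj0 hjlt
  · intro j hj0 hjlen hpj
    simp only [List.length_append, List.length_cons, List.length_nil] at hjlen
    omega
  · intro _ j hj0 hjlen hpj
    simp only [List.length_append, List.length_cons, List.length_nil] at hjlen
    omega

theorem pop_ok {a : Int × Int × Int} {t : List (Int × Int × Int)} (hh : IsHeap (a :: t)) :
    (heappop (a :: t)).1 = a ∧ IsHeap (heappop (a :: t)).2 ∧ ((heappop (a :: t)).2).Perm t := by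
  rcases List.eq_nil_or_concat t with rfl | ⟨s, z, rfl⟩
  · have hpp : heappop [a] = (a, ([] : List (Int × Int × Int))) := by simp [heappop]
    rw [hpp]
    exact ⟨rfl, fun j hj0 hjlen => absurd hjlen (by simp), List.Perm.refl _⟩
  · simp only [List.concat_eq_append] at hh ⊢
    have hdl : (a :: (s ++ [z])).dropLast = a :: s := by
      simpa using List.dropLast_concat (l₁ := a :: s) (b := z)
    have hlast : (a :: (s ++ [z])).getD ((a :: (s ++ [z])).length - 1) default = z := by
      have : (a :: (s ++ [z])) = (a :: s) ++ [z] := by simp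
      rw [this]
      simp [List.getD_eq_getElem?_getD]
    rw [heappop, hlast, hdl]
    simp only [List.length_cons, List.set_cons_zero]
    rw [if_pos (by simp)]
    have hres := su_sd_ok (z :: s).length (z :: s) 0 z (by omega) (by simp) ?_ ?_
    · refine ⟨rfl, hres.1, ?_⟩
      have := hres.2
      rw [List.set_cons_zero] at this
      exact this.trans (by simpa using (List.perm_append_singleton z s).symm)
    · -- K at the root hole
      intro j hj0 hjlen hjne hpjne
      simp only [List.length_cons] at hjlen
      have hget : ∀ i, 0 < i → i < (z :: s).length →
          (z :: s).getD i default = (a :: (s ++ [z])).getD i default := by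
        intro i hi0 hilen
        simp only [List.length_cons] at hilen
        cases i with
        | zero => omega
        | succ m =>
          simp only [List.getD_cons_succ]
          rw [List.getD_append _ _ _ _ (by omega)]
      rw [hget j hj0 (by simpa using hjlen), hget ((j - 1) / 2) (by omega) (by simp; omega)]
      exact hh j hj0 (by simp; omega)
    · intro h0; omega
  

theorem dec_root_heap {a b : Int × Int × Int} {t : List (Int × Int × Int)}
    (hh : IsHeap (a :: t)) (hba : Le b a) : IsHeap (b :: t) := by
  intro j hj0 hjlen
  simp only [List.length_cons] at hjlen
  have hj : (b :: t).getD j default = (a :: t).getD j default := by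
    cases j with
    | zero => omega
    | succ m => simp
  rw [hj]
  by_cases hq : (j - 1) / 2 = 0
  · rw [hq]
    exact pvLeTrans hba (by simpa [hq] using hh j hj0 (by simpa using hjlen))
  · have : (b :: t).getD ((j - 1) / 2) default = (a :: t).getD ((j - 1) / 2) default := by
      cases hQ : (j - 1) / 2 with
      | zero => omega
      | succ m => simp
    rw [this]
    exact hh j hj0 (by simpa using hjlen)

-- B-side abstraction: the multiset of active (remaining, num, idx) triples
def akey (procs : List (List (String × Int))) (remaining : List (Option Int)) (i : Nat) :
    Option (Int × Int × Int) :=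
  (remaining.getD i none).map (fun r => (r, dGet (procAt procs (i : Int)) "num", (i : Int)))

def activeL (procs : List (List (String × Int))) (remaining : List (Option Int)) (cnt : Nat) :
    List (Int × Int × Int) :=
  (List.range cnt).filterMap (akey procs remaining)

-- generic point-update facts for List.getD
theorem getD_set_self' {α : Type} {l : List α} {i : Nat} {v d : α} (h : i < l.length) :
    (l.set i v).getD i d = v := by
  simp [List.getD_eq_getElem?_getD, h]
theorem getD_set_ne' {α : Type} {l : List α} {i j : Nat} {v d : α} (h : i ≠ j) :
    (l.set i v).getD j d = l.getD j d := by
  simp [List.getD_eq_getElem?_getD, List.getElem?_set_ne h]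

-- strict-order facts
theorem pvLtTrans {a b c : Int × Int × Int} (h1 : eLt a b = true) (h2 : eLt b c = true) :
    eLt a c = true := by
  obtain ⟨a1, a2, a3⟩ := a; obtain ⟨b1, b2, b3⟩ := b; obtain ⟨c1, c2, c3⟩ := c
  simp [eLt] at *; omega
theorem pvLtOfNotLt {a b : Int × Int × Int} (h1 : eLt a b = false) (h2 : a.2.2 ≠ b.2.2) :
    eLt b a = true := by
  obtain ⟨a1, a2, a3⟩ := a; obtain ⟨b1, b2, b3⟩ := b
  simp [eLt] at *; omega

theorem dec_le (a : Int × Int × Int) : Le (a.1 - 1, a.2.1, a.2.2) a := by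
  obtain ⟨a1, a2, a3⟩ := a
  simp [Le, eLt]

-- reads through setEnd: any key other than 'end' is unchanged, at every index
theorem dGet_setEnd {procs : List (List (String × Int))} {iN : Nat} (jN : Nat) {v : Int}
    {k : String} (hk : k ≠ "end") (hi : iN < procs.length) :
    dGet (procAt (setEnd procs (iN : Int) v) (jN : Int)) k = dGet (procAt procs (jN : Int)) k := by
  unfold setEnd procAt dGet
  simp only [PySem.List.pySetD_natCast, PySem.List.pyGetD_natCast]
  by_cases hj : iN = jN
  · subst hj
    rw [getD_set_self' hi]
    rw [PySem.Dict.getD_insert]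
    simp [hk]
  · rw [getD_set_ne' hj]

theorem length_setEnd {procs : List (List (String × Int))} {i v : Int} :
    (setEnd procs i v).length = procs.length := by
  simp [setEnd, PySem.List.length_pySetD]

-- the (remaining, num, idx) key of a position, as B's comparison sees it
def realKey (procs : List (List (String × Int))) (remaining : List (Option Int)) (i : Nat) :
    Int × Int × Int :=
  ((remaining.getD i none).getD 0, dGet (procAt procs (i : Int)) "num", (i : Int))

theorem keyB_realKey (procs : List (List (String × Int))) (rem : List (Option Int)) (i : Nat) :
    keyB procs rem (i : Int) = realKey procs rem i := by
  simp [keyB, realKey]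

-- activeL decomposition / congruence
theorem activeL_congr {procs procs' : List (List (String × Int))}
    {rem rem' : List (Option Int)} {cnt : Nat}
    (h : ∀ j, j < cnt → akey procs' rem' j = akey procs rem j) :
    activeL procs' rem' cnt = activeL procs rem cnt := by
  unfold activeL
  exact List.filterMap_congr (fun j hj => h j (List.mem_range.mp hj))

theorem activeL_succ {procs : List (List (String × Int))} {rem : List (Option Int)} {cnt : Nat} :
    activeL procs rem (cnt + 1) = activeL procs rem cnt ++ (akey procs rem cnt).toList := by
  unfold activeL
  rw [List.range_succ, List.filterMap_append]
  cases h : akey procs rem cnt <;> simp [h]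

theorem activeL_split {procs : List (List (String × Int))} {rem : List (Option Int)}
    {i cnt : Nat} (hi : i < cnt) :
    activeL procs rem cnt = activeL procs rem i ++ (akey procs rem i).toList ++
      (List.range (cnt - (i + 1))).filterMap (fun m => akey procs rem (i + 1 + m)) := by
  unfold activeL
  conv_lhs => rw [show cnt = (i + 1) + (cnt - (i + 1)) from by omega]
  rw [List.range_add, List.filterMap_append, List.range_succ, List.filterMap_append,
    List.filterMap_map]
  cases h : akey procs rem i <;> simp [h]

-- B's selection scan finds the strict minimum of the active keys
theorem selB_spec (procs : List (List (String × Int))) (rem : List (Option Int)) : ∀ cnt : Nat,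
    (selB procs rem cnt = -1 ∧ ∀ j, j < cnt → rem.getD j none = none) ∨
    (∃ iN : Nat, selB procs rem cnt = (iN : Int) ∧ iN < cnt ∧ (rem.getD iN none).isSome ∧
      ∀ j, j < cnt → j ≠ iN → (rem.getD j none).isSome →
        eLt (realKey procs rem iN) (realKey procs rem j) = true) := by
  intro cnt
  induction cnt with
  | zero => exact Or.inl ⟨rfl, fun j hj => absurd hj (by omega)⟩
  | succ cnt ih =>
    rcases ih with ⟨hsel, hnone⟩ | ⟨iN, hsel, hiN, hsome, hmin⟩
    · cases hr : rem.getD cnt none with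
      | none =>
        have heq : selB procs rem (cnt + 1) = selB procs rem cnt := by
          unfold selB; rw [List.range_succ, List.foldl_append]; simp only [List.foldl_cons, List.foldl_nil]; rw [hr]
        left
        refine ⟨heq.trans hsel, fun j hj => ?_⟩
        by_cases hjc : j = cnt
        · subst hjc; exact hr
        · exact hnone j (by omega)
      | some r =>
        have heq : selB procs rem (cnt + 1) =
            if (selB procs rem cnt == -1) ||
              eLt (r, dGet (procAt procs (cnt : Int)) "num", (cnt : Int))
                (keyB procs rem (selB procs rem cnt)) then (cnt : Int) else selB procs rem cnt := by
          unfold selB; rw [List.range_succ, List.foldl_append]; simp only [List.foldl_cons, List.foldl_nil]; rw [hr]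
        right
        refine ⟨cnt, ?_, by omega, by rw [hr]; rfl, ?_⟩
        · rw [heq, hsel]; simp
        · intro j hj hjne hjsome
          rw [hnone j (by omega)] at hjsome
          simp at hjsome
    · cases hr : rem.getD cnt none with
      | none =>
        have heq : selB procs rem (cnt + 1) = selB procs rem cnt := by
          unfold selB; rw [List.range_succ, List.foldl_append]; simp only [List.foldl_cons, List.foldl_nil]; rw [hr]
        right
        refine ⟨iN, heq.trans hsel, by omega, hsome, fun j hj hjne hjsome => ?_⟩
        by_cases hjc : j = cnt
        · subst hjc; rw [hr] at hjsome; simp at hjsome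
        · exact hmin j (by omega) hjne hjsome
      | some r =>
        have heq : selB procs rem (cnt + 1) =
            if (selB procs rem cnt == -1) ||
              eLt (r, dGet (procAt procs (cnt : Int)) "num", (cnt : Int))
                (keyB procs rem (selB procs rem cnt)) then (cnt : Int) else selB procs rem cnt := by
          unfold selB; rw [List.range_succ, List.foldl_append]; simp only [List.foldl_cons, List.foldl_nil]; rw [hr]
        have hkey : (r, dGet (procAt procs (cnt : Int)) "num", (cnt : Int)) =
            realKey procs rem cnt := by simp only [realKey]; rw [hr]; rfl
        have hne1 : (((iN : Int)) == -1) = false := by simp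
        rw [hsel, hne1, keyB_realKey, hkey, Bool.false_or] at heq
        by_cases hlt : eLt (realKey procs rem cnt) (realKey procs rem iN) = true
        · rw [if_pos hlt] at heq
          right
          refine ⟨cnt, heq, by omega, by rw [hr]; rfl, fun j hj hjne hjsome => ?_⟩
          by_cases hji : j = iN
          · subst hji; exact hlt
          · exact pvLtTrans hlt (hmin j (by omega) hji hjsome)
        · rw [if_neg (by simp [hlt])] at heq
          right
          refine ⟨iN, heq, by omega, hsome, fun j hj hjne hjsome => ?_⟩
          by_cases hjc : j = cnt
          · subst hjc
            refine pvLtOfNotLt (by simpa using hlt) ?_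
            simp [realKey]
            omega
          · exact hmin j (by omega) hjne hjsome

-- the heap root is B's selection
theorem root_sel {procs : List (List (String × Int))} {rem : List (Option Int)} {cnt : Nat}
    {root : Int × Int × Int} {tl : List (Int × Int × Int)}
    (hh : IsHeap (root :: tl)) (hperm : (root :: tl).Perm (activeL procs rem cnt)) :
    ∃ iN : Nat, iN < cnt ∧ rem.getD iN none = some root.1 ∧ root = realKey procs rem iN ∧
      selB procs rem cnt = (iN : Int) := by
  have hmem : root ∈ activeL procs rem cnt := hperm.subset (List.mem_cons_self)
  unfold activeL at hmem
  obtain ⟨i, hirange, hak⟩ := List.mem_filterMap.mp hmem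
  have hiN : i < cnt := List.mem_range.mp hirange
  unfold akey at hak
  cases hri : rem.getD i none with
  | none => rw [hri] at hak; simp at hak
  | some r =>
    rw [hri] at hak
    simp only [Option.map_some] at hak
    injection hak with hak
    have hrk : root = realKey procs rem i := by rw [← hak]; simp only [realKey]; rw [hri]; rfl
    have hr1 : rem.getD i none = some root.1 := by rw [hri, ← hak]
    have hminAll : ∀ x ∈ (root :: tl), Le root x := by
      intro x hx
      obtain ⟨idx, hidxlt, hidxeq⟩ := List.mem_iff_getElem.mp hx
      have hle := root_min hh idx hidxlt
      rw [List.getD_cons_zero] at hle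
      have hg : (root :: tl).getD idx default = x := by
        simp [List.getD_eq_getElem?_getD, List.getElem?_eq_getElem hidxlt, hidxeq]
      rwa [hg] at hle
    have hminK : ∀ j, j < cnt → (rem.getD j none).isSome → Le root (realKey procs rem j) := by
      intro j hj hjs
      refine hminAll _ (hperm.mem_iff.mpr ?_)
      unfold activeL
      refine List.mem_filterMap.mpr ⟨j, List.mem_range.mpr hj, ?_⟩
      cases hq : rem.getD j none with
      | none => rw [hq] at hjs; simp at hjs
      | some rr => simp only [akey, realKey, hq, Option.map_some, Option.getD_some]
    rcases selB_spec procs rem cnt with ⟨hsel, hnone⟩ | ⟨jN, hsel, hj, hjs, hjmin⟩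
    · rw [hnone i hiN] at hri; cases hri
    · by_cases hji : jN = i
      · subst hji; exact ⟨jN, hiN, hr1, hrk, hsel⟩
      · exfalso
        have h1 := hjmin i hiN (fun hE => hji hE.symm) (by rw [hri]; rfl)
        have h2 := hminK jN hj hjs
        rw [hrk] at h2
        exact absurd h1 (by rw [h2]; simp)

-- Gantt-row equality: A's append-then-overwrite equals B's direct append
theorem y_write (l : List Int) (c : Nat) (v : Int) :
    (l ++ List.replicate (c + 1) 0).set (l.length + c) v = l ++ List.replicate c 0 ++ [v] := by
  rw [List.set_append_right _ _ (by omega)]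
  have h1 : l.length + c - l.length = c := by omega
  rw [h1, List.replicate_succ' (n := c), List.set_append_right _ _ (by simp),
    List.append_assoc]
  simp

-- point update of the active multiset
theorem activeL_update {procs procs' : List (List (String × Int))} {rem : List (Option Int)}
    {o : Option Int} {iN cnt : Nat} (hiN : iN < cnt) (hrlen : iN < rem.length)
    (hpnum : ∀ j : Nat, dGet (procAt procs' (j : Int)) "num" = dGet (procAt procs (j : Int)) "num") :
    activeL procs' (rem.set iN o) cnt =
      activeL procs rem iN ++
        (o.map (fun r => (r, dGet (procAt procs (iN : Int)) "num", (iN : Int)))).toList ++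
        (List.range (cnt - (iN + 1))).filterMap (fun m => akey procs rem (iN + 1 + m)) := by
  rw [activeL_split (i := iN) hiN]
  congr 1
  · congr 1
    · exact activeL_congr (fun j hj => by
        unfold akey
        rw [getD_set_ne' (by omega)]
        cases hq : rem.getD j none <;> simp [hpnum j])
    · unfold akey
      rw [getD_set_self' hrlen]
      cases o <;> simp [hpnum iN]
  · exact List.filterMap_congr (fun m _ => by
      unfold akey
      rw [getD_set_ne' (by omega)]
      have hnum := hpnum (iN + 1 + m)
      push_cast at hnum
      cases hq : rem.getD (iN + 1 + m) none <;> simp [hnum])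

-- the original active multiset, decomposed at the selected index
theorem activeL_at {procs : List (List (String × Int))} {rem : List (Option Int)}
    {iN cnt : Nat} {root : Int × Int × Int} (hiN : iN < cnt)
    (hrem : rem.getD iN none = some root.1) (hrk : root = realKey procs rem iN) :
    activeL procs rem cnt =
      activeL procs rem iN ++ root ::
        (List.range (cnt - (iN + 1))).filterMap (fun m => akey procs rem (iN + 1 + m)) := by
  rw [activeL_split (i := iN) hiN]
  have : akey procs rem iN = some root := by
    unfold akey
    rw [hrem]
    simp only [Option.map_some, Option.some.injEq]
    rw [hrk]
    simp only [realKey, hrem]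
  rw [this]
  simp

-- admission runs in lockstep
theorem admit_eq (procs : List (List (String × Int))) (n : Nat) (time : Int) :
    ∀ k cnt (hp : List (Int × Int × Int)) (rem : List (Option Int)),
    n - cnt ≤ k → cnt ≤ n → rem.length = n → n = procs.length →
    IsHeap hp → hp.Perm (activeL procs rem cnt) →
    (admitA procs n cnt time hp).1 = (admitB procs n cnt time rem).1 ∧
    IsHeap (admitA procs n cnt time hp).2 ∧
    (admitA procs n cnt time hp).2.Perm
      (activeL procs (admitB procs n cnt time rem).2 (admitB procs n cnt time rem).1) ∧
    (admitB procs n cnt time rem).2.length = n ∧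
    cnt ≤ (admitA procs n cnt time hp).1 ∧ (admitA procs n cnt time hp).1 ≤ n := by
  intro k
  induction k with
  | zero =>
    intro cnt hp rem hk hcn hrl hnp hh hperm
    have hg : ¬(cnt < n ∧ dGet (procAt procs (cnt : Int)) "arrival" ≤ time) :=
      fun hc => absurd hc.1 (by omega)
    rw [admitA, admitB, dif_neg hg, dif_neg hg]
    exact ⟨rfl, hh, hperm, hrl, Nat.le_refl _, hcn⟩
  | succ k ih =>
    intro cnt hp rem hk hcn hrl hnp hh hperm
    rw [admitA, admitB]
    by_cases hg : cnt < n ∧ dGet (procAt procs (cnt : Int)) "arrival" ≤ time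
    · rw [dif_pos hg, dif_pos hg]
      have hres := ih (cnt + 1)
        (heappush hp (dGet (procAt procs (cnt : Int)) "burst",
          dGet (procAt procs (cnt : Int)) "num", (cnt : Int)))
        (rem.set cnt (some (dGet (procAt procs (cnt : Int)) "burst")))
        (by omega) (by omega) (by simp [hrl]) hnp (push_ok hh _).1 ?_
      · exact ⟨hres.1, hres.2.1, hres.2.2.1, hres.2.2.2.1, by omega, hres.2.2.2.2.2⟩
      · have hAL : activeL procs
            (rem.set cnt (some (dGet (procAt procs (cnt : Int)) "burst"))) (cnt + 1) =
            activeL procs rem cnt ++ [(dGet (procAt procs (cnt : Int)) "burst",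
              dGet (procAt procs (cnt : Int)) "num", (cnt : Int))] := by
          rw [activeL_succ]
          congr 1
          · exact activeL_congr (fun j hj => by unfold akey; rw [getD_set_ne' (by omega)])
          · unfold akey
            rw [getD_set_self' (by omega : cnt < rem.length)]
            rfl
        rw [hAL]
        exact (push_ok hh _).2.trans
          ((hperm.cons _).trans (List.perm_append_singleton _ _).symm)
    · rw [dif_neg hg, dif_neg hg]
      exact ⟨rfl, hh, hperm, hrl, Nat.le_refl _, hcn⟩

-- the main loops run in lockstep
theorem loop_eq (contx : Int) (hcx : 0 ≤ contx) (n : Nat) :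
    ∀ fuel procs rem cnt time (hp : List (Int × Int × Int)) finish last y,
    cnt ≤ n → rem.length = n → n = procs.length → time = (y.length : Int) - 1 →
    IsHeap hp → hp.Perm (activeL procs rem cnt) →
    loopA contx n fuel procs cnt time hp finish last y =
      loopB contx n fuel procs rem cnt finish last y := by
  intro fuel
  induction fuel with
  | zero => intro procs rem cnt time hp finish last y _ _ _ _ _ _; rfl
  | succ fuel ih =>
    intro procs rem cnt time hp finish last y hcn hrl hnp hty hh hperm
    rw [loopA, loopB]
    by_cases hfin : finish < n
    · rw [if_pos hfin, if_pos hfin]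
      dsimp only
      have hty' : (y.length : Int) - 1 = time := hty.symm
      rw [hty']
      obtain ⟨hcnt, hhA, hpermA, hrlB, hcle, hcleN⟩ :=
        admit_eq procs n time (n - cnt) cnt hp rem (Nat.le_refl _) hcn hrl hnp hh hperm
      rw [← hcnt] at hpermA ⊢
      generalize hGr : (admitB procs n cnt time rem).2 = rem2 at hpermA hrlB ⊢
      generalize hGc : (admitA procs n cnt time hp).1 = cnt2 at hpermA hcle hcleN ⊢
      generalize hGh : (admitA procs n cnt time hp).2 = hp2 at hhA hpermA ⊢
      cases hp2 with
      | nil =>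
        have hALnil : activeL procs rem2 cnt2 = [] := List.perm_nil.mp hpermA.symm
        have hselN : selB procs rem2 cnt2 = -1 := by
          rcases selB_spec procs rem2 cnt2 with ⟨h1, _⟩ | ⟨iN, h1, hiN2, hsome, _⟩
          · exact h1
          · exfalso
            have hnone := List.filterMap_eq_nil_iff.mp hALnil _ (List.mem_range.mpr hiN2)
            unfold akey at hnone
            cases hq : rem2.getD iN none with
            | none => rw [hq] at hsome; simp at hsome
            | some rr => rw [hq] at hnone; simp at hnone
        rw [hselN, if_neg (by simp : ¬ 0 < (List.nil : List (Int × Int × Int)).length),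
          if_pos (by decide : (((-1 : Int)) == -1) = true)]
        exact ih procs rem2 cnt2 (time + 1) [] finish last (y ++ [0]) hcleN hrlB hnp
          (by simp; omega) (fun j hj0 hjlen => absurd hjlen (by simp)) (by rw [hALnil])
      | cons root tl =>
        obtain ⟨iN, hiN, hrem, hrk, hselB⟩ := root_sel hhA hpermA
        have h22 : root.2.2 = (iN : Int) := by rw [hrk]; rfl
        have h21 : root.2.1 = dGet (procAt procs (iN : Int)) "num" := by rw [hrk]; rfl
        rw [hselB, if_pos (by simp : 0 < (root :: tl).length),
          if_neg (by simp : ¬ (((iN : Int)) == -1) = true)]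
        simp only [List.getD_cons_zero]
        rw [h22]
        simp only [List.set_cons_zero, List.getD_cons_zero, Int.toNat_natCast]
        rw [hrem]
        simp only [Option.getD_some]
        by_cases hsw : last ≠ -1 ∧ (iN : Int) ≠ last
        · rw [if_pos hsw, if_pos hsw]
          dsimp only
          have hyE : PySem.List.pySetD (y ++ [0] ++ List.replicate contx.toNat 0)
              (time + 1 + contx) (dGet (procAt procs (iN : Int)) "num") =
              y ++ List.replicate contx.toNat 0 ++ [dGet (procAt procs (iN : Int)) "num"] := by
            rw [PySem.List.pySetD_of_nonneg _ _ (by omega)]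
            have h1 : (time + 1 + contx).toNat = y.length + contx.toNat := by omega
            rw [h1]
            have h2 : y ++ [0] ++ List.replicate contx.toNat 0 =
                y ++ List.replicate (contx.toNat + 1) 0 := by
              rw [List.append_assoc, List.replicate_succ]
              rfl
            rw [h2, y_write y contx.toNat _]
          rw [hyE]
          have htN : time + 1 + contx =
              (((y ++ List.replicate contx.toNat 0 ++
                [dGet (procAt procs (iN : Int)) "num"]).length : Int)) - 1 := by
            simp only [List.length_append, List.length_replicate, List.length_cons,
              List.length_nil]
            push_cast
            omega
          rw [htN]
          by_cases hz : ((root.1 - 1) == 0) = true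
          · rw [if_pos hz, if_pos hz]
            have hle := dec_le root
            rw [h22] at hle
            have hheap3 : IsHeap ((root.1 - 1, root.2.1, (iN : Int)) :: tl) :=
              dec_root_heap hhA hle
            obtain ⟨hpop1, hpop2, hpop3⟩ := pop_ok hheap3
            rw [hpop1]
            dsimp only
            have htl : tl.Perm (activeL procs rem2 iN ++
                (List.range (cnt2 - (iN + 1))).filterMap (fun m => akey procs rem2 (iN + 1 + m))) := by
              have hAL := activeL_at hiN hrem hrk
              have h1 := hpermA.trans (by rw [hAL] : (activeL procs rem2 cnt2).Perm
                (activeL procs rem2 iN ++ root ::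
                  (List.range (cnt2 - (iN + 1))).filterMap (fun m => akey procs rem2 (iN + 1 + m))))
              exact (h1.trans List.perm_middle).cons_inv
            apply ih
            · exact hcleN
            · simp [hrlB]
            · rw [length_setEnd]; exact hnp
            · rfl
            · exact hpop2
            · rw [activeL_update hiN (by omega) (fun j => dGet_setEnd j (by decide) (by omega))]
              refine (hpop3.trans htl).trans ?_
              simp
          · rw [if_neg hz, if_neg hz]
            have hle := dec_le root
            rw [h22] at hle
            have hheap3 : IsHeap ((root.1 - 1, root.2.1, (iN : Int)) :: tl) :=
              dec_root_heap hhA hle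
            have htl : tl.Perm (activeL procs rem2 iN ++
                (List.range (cnt2 - (iN + 1))).filterMap (fun m => akey procs rem2 (iN + 1 + m))) := by
              have hAL := activeL_at hiN hrem hrk
              have h1 := hpermA.trans (by rw [hAL] : (activeL procs rem2 cnt2).Perm
                (activeL procs rem2 iN ++ root ::
                  (List.range (cnt2 - (iN + 1))).filterMap (fun m => akey procs rem2 (iN + 1 + m))))
              exact (h1.trans List.perm_middle).cons_inv
            apply ih
            · exact hcleN
            · simp [hrlB]
            · exact hnp
            · rfl
            · exact hheap3
            · rw [activeL_update hiN (by omega) (fun j => rfl)]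
              refine ((htl.cons _).trans ?_)
              have hmid : (root.1 - 1, dGet (procAt procs (iN : Int)) "num", (iN : Int)) =
                  (root.1 - 1, root.2.1, (iN : Int)) := by rw [h21]
              simp only [Option.map_some, Option.toList_some, hmid]
              simpa using List.perm_middle.symm
        · rw [if_neg hsw, if_neg hsw]
          dsimp only
          have hyE : PySem.List.pySetD (y ++ [0]) (time + 1)
              (dGet (procAt procs (iN : Int)) "num") =
              y ++ [dGet (procAt procs (iN : Int)) "num"] := by
            rw [PySem.List.pySetD_of_nonneg _ _ (by omega)]
            have h1 : (time + 1).toNat = y.length + 0 := by omega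
            rw [h1]
            have h2 : y ++ [0] = y ++ List.replicate (0 + 1) 0 := by rfl
            rw [h2, y_write y 0 _]
            simp
          rw [hyE]
          have htN : time + 1 =
              (((y ++ [dGet (procAt procs (iN : Int)) "num"]).length : Int)) - 1 := by
            simp only [List.length_append, List.length_cons, List.length_nil]
            push_cast
            omega
          rw [htN]
          by_cases hz : ((root.1 - 1) == 0) = true
          · rw [if_pos hz, if_pos hz]
            have hle := dec_le root
            rw [h22] at hle
            have hheap3 : IsHeap ((root.1 - 1, root.2.1, (iN : Int)) :: tl) :=
              dec_root_heap hhA hle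
            obtain ⟨hpop1, hpop2, hpop3⟩ := pop_ok hheap3
            rw [hpop1]
            dsimp only
            have htl : tl.Perm (activeL procs rem2 iN ++
                (List.range (cnt2 - (iN + 1))).filterMap (fun m => akey procs rem2 (iN + 1 + m))) := by
              have hAL := activeL_at hiN hrem hrk
              have h1 := hpermA.trans (by rw [hAL] : (activeL procs rem2 cnt2).Perm
                (activeL procs rem2 iN ++ root ::
                  (List.range (cnt2 - (iN + 1))).filterMap (fun m => akey procs rem2 (iN + 1 + m))))
              exact (h1.trans List.perm_middle).cons_inv
            apply ih
            · exact hcleN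
            · simp [hrlB]
            · rw [length_setEnd]; exact hnp
            · rfl
            · exact hpop2
            · rw [activeL_update hiN (by omega) (fun j => dGet_setEnd j (by decide) (by omega))]
              refine (hpop3.trans htl).trans ?_
              simp
          · rw [if_neg hz, if_neg hz]
            have hle := dec_le root
            rw [h22] at hle
            have hheap3 : IsHeap ((root.1 - 1, root.2.1, (iN : Int)) :: tl) :=
              dec_root_heap hhA hle
            have htl : tl.Perm (activeL procs rem2 iN ++
                (List.range (cnt2 - (iN + 1))).filterMap (fun m => akey procs rem2 (iN + 1 + m))) := by
              have hAL := activeL_at hiN hrem hrk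
              have h1 := hpermA.trans (by rw [hAL] : (activeL procs rem2 cnt2).Perm
                (activeL procs rem2 iN ++ root ::
                  (List.range (cnt2 - (iN + 1))).filterMap (fun m => akey procs rem2 (iN + 1 + m))))
              exact (h1.trans List.perm_middle).cons_inv
            apply ih
            · exact hcleN
            · simp [hrlB]
            · exact hnp
            · rfl
            · exact hheap3
            · rw [activeL_update hiN (by omega) (fun j => rfl)]
              refine ((htl.cons _).trans ?_)
              have hmid : (root.1 - 1, dGet (procAt procs (iN : Int)) "num", (iN : Int)) =
                  (root.1 - 1, root.2.1, (iN : Int)) := by rw [h21]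
              simp only [Option.map_some, Option.toList_some, hmid]
              simpa using List.perm_middle.symm

    · rw [if_neg hfin, if_neg hfin]

-- ===== VERDICT (by name: the statement is the Claim_ definition above) =====
theorem SRTN_spec : Claim_equal_SRTN := by
  intro procs contx _ hpre
  unfold Spec_SRTN SRTN SRTN_alt
  exact loop_eq contx hpre.1 procs.length (fuelFor procs) procs
    (List.replicate procs.length none) 0 0 [] 0 (-1) [0]
    (by omega) (by simp) rfl rfl
    (fun j hj0 hjlen => absurd hjlen (by simp))
    (by simp [activeL])
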